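-- pv_equiv track=rewrite | github.com/samuelbraun04/Instrumentator | SamplePackGenerator.py | expand_number_range
-- ===== SOURCE A (Python) =====
-- def expand_number_range(number):
--     # Initialize the list with the starting number
--     numbers = [number]
--
--     # Subtract 12 until <= 0
--     current = number
--     while current - 12 >= 0:
--         current -= 12
--         numbers.append(current)
--
--     # Reset current to the starting number
--     current = number
--     # Add 12 until >= 127
--     while current + 12 <= 127:
--         current += 12
--         numbers.append(current)
--
--     # Sort the list to have the sequence in ascending order
--     numbers.sort()
--
--     return numbers
-- ===== SOURCE B (Python) =====
-- def expand_number_range(number):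
--     d = max(0, number // 12)          # steps downward (A stops when current - 12 < 0)
--     u = max(0, (127 - number) // 12)  # steps upward (A stops when current + 12 > 127)
--     return [number + 12 * k for k in range(-d, u + 1)]
-- ===== Notes on version B (the rewrite author's own statement) =====
-- stated objective: simpler
-- what changed: Replaces A's two directional while-loops plus a final sort by computing the step counts d = max(0, n//12) and u = max(0, (127-n)//12) in closed form and emitting the already-ascending list [n+12k for k in range(-d, u+1)] in one pass, with no sort.
import Mathlib
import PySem

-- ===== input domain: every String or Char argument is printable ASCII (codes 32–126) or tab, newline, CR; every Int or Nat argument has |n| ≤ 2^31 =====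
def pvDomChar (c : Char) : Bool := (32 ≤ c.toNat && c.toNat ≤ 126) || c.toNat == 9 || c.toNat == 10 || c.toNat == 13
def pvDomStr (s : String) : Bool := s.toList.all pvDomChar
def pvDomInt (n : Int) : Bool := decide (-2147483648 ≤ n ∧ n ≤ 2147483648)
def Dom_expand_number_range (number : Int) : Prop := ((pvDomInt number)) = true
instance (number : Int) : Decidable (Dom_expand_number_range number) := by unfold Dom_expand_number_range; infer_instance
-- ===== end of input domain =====

-- B replaces A's two while-loops plus sort by a directly computed k-range [−d, u] and one
-- ascending generating pass (objective: simpler; no sort needed).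

-- ===== PORT A =====
-- 'while current - 12 >= 0: current -= 12; numbers.append(current)'
def pvDownLoop (current : Int) (numbers : List Int) : List Int :=
  if current - 12 ≥ 0 then pvDownLoop (current - 12) (numbers ++ [current - 12]) else numbers
termination_by current.toNat
decreasing_by omega

-- 'while current + 12 <= 127: current += 12; numbers.append(current)'
def pvUpLoop (current : Int) (numbers : List Int) : List Int :=
  if current + 12 ≤ 127 then pvUpLoop (current + 12) (numbers ++ [current + 12]) else numbers
termination_by (127 - current).toNat
decreasing_by omega

def expand_number_range (number : Int) : List Int :=
  let numbers := [number]
  let numbers := pvDownLoop number numbers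
  let numbers := pvUpLoop number numbers
  PySem.List.sorted numbers (fun x => x) false

-- ===== PORT B =====
def expand_number_range_alt (number : Int) : List Int :=
  let d := max 0 (PySem.Int.floordiv number 12)
  let u := max 0 (PySem.Int.floordiv (127 - number) 12)
  (PySem.List.pyRange (-d) (u + 1) 1).map (fun k => number + 12 * k)

-- ===== PRECONDITION & SPEC =====
def Spec_expand_number_range (number : Int) (out : List Int) : Prop := out = expand_number_range_alt number
instance (number : Int) (out : List Int) : Decidable (Spec_expand_number_range number out) := by unfold Spec_expand_number_range; infer_instance

-- ===== CLAIM (what is proved, stated in full; the proofs are below) =====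
def Claim_equal_expand_number_range : Prop := ∀ (number : Int), Dom_expand_number_range number → Spec_expand_number_range number (expand_number_range number)

-- ===== LEMMAS AND PROOFS =====

-- the elements the down loop appends, in A's (descending) generation order
def pvDownList (c : Int) : List Int :=
  if c - 12 ≥ 0 then (c - 12) :: pvDownList (c - 12) else []
termination_by c.toNat
decreasing_by omega

-- the elements the up loop appends, in A's (ascending) generation order
def pvUpList (c : Int) : List Int :=
  if c + 12 ≤ 127 then (c + 12) :: pvUpList (c + 12) else []
termination_by (127 - c).toNat
decreasing_by omega

theorem pvDownLoop_eq (c : Int) : ∀ acc, pvDownLoop c acc = acc ++ pvDownList c := by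
  induction c using pvDownList.induct with
  | case1 c h ih =>
      intro acc
      rw [pvDownLoop, pvDownList, if_pos h, if_pos h, ih, List.append_assoc]
      rfl
  | case2 c h =>
      intro acc
      rw [pvDownLoop, pvDownList, if_neg h, if_neg h, List.append_nil]

theorem pvUpLoop_eq (c : Int) : ∀ acc, pvUpLoop c acc = acc ++ pvUpList c := by
  induction c using pvUpList.induct with
  | case1 c h ih =>
      intro acc
      rw [pvUpLoop, pvUpList, if_pos h, if_pos h, ih, List.append_assoc]
      rfl
  | case2 c h =>
      intro acc
      rw [pvUpLoop, pvUpList, if_neg h, if_neg h, List.append_nil]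

theorem pvDownList_eq (c : Int) :
    pvDownList c = (List.range (c / 12).toNat).map (fun (i : Nat) => c - 12 * ((i : Int) + 1)) := by
  induction c using pvDownList.induct with
  | case1 c h ih =>
      rw [pvDownList, if_pos h, ih]
      have h1 : (c / 12).toNat = ((c - 12) / 12).toNat + 1 := by omega
      rw [h1, List.range_succ_eq_map, List.map_cons, List.map_map]
      congr 1
      apply List.map_congr_left
      intro a _
      simp only [Function.comp_apply, Nat.succ_eq_add_one]
      push_cast
      ring
  | case2 c h =>
      rw [pvDownList, if_neg h]
      have h1 : (c / 12).toNat = 0 := by omega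
      simp [h1]

theorem pvUpList_eq (c : Int) :
    pvUpList c = (List.range ((127 - c) / 12).toNat).map (fun (i : Nat) => c + 12 * ((i : Int) + 1)) := by
  induction c using pvUpList.induct with
  | case1 c h ih =>
      rw [pvUpList, if_pos h, ih]
      have h1 : ((127 - c) / 12).toNat = ((127 - (c + 12)) / 12).toNat + 1 := by omega
      rw [h1, List.range_succ_eq_map, List.map_cons, List.map_map]
      congr 1
      apply List.map_congr_left
      intro a _
      simp only [Function.comp_apply, Nat.succ_eq_add_one]
      push_cast
      ring
  | case2 c h =>
      rw [pvUpList, if_neg h]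
      have h1 : ((127 - c) / 12).toNat = 0 := by omega
      simp [h1]

-- ===== VERDICT (by name: the statement is the Claim_ definition above) =====
theorem expand_number_range_spec : Claim_equal_expand_number_range := by
  intro n _
  show _ = _
  unfold expand_number_range expand_number_range_alt
  simp only []
  set f : Int → Int := fun k => n + 12 * k with hf
  set d : Int := max 0 (PySem.Int.floordiv n 12) with hd
  set u : Int := max 0 (PySem.Int.floordiv (127 - n) 12) with hu
  have hd' : d = max 0 (n / 12) := by
    rw [hd, PySem.Int.floordiv_eq_ediv_of_pos (by norm_num)]
  have hu' : u = max 0 ((127 - n) / 12) := by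
    rw [hu, PySem.Int.floordiv_eq_ediv_of_pos (by norm_num)]
  have hd0 : 0 ≤ d := by rw [hd']; exact le_max_left _ _
  have hu0 : 0 ≤ u := by rw [hu']; exact le_max_left _ _
  -- B's range, split at k = 0
  have hsplit : PySem.List.pyRange (-d) (u + 1) 1 =
      PySem.List.pyRange (-d) 0 1 ++ (0 :: PySem.List.pyRange 1 (u + 1) 1) := by
    rw [PySem.List.pyRange_one_append (-d) 0 (u + 1) (by omega) (by omega)]
    congr 1
    exact PySem.List.pyRange_one_cons (by omega)
  -- the down-loop elements are the k < 0 segment of B, reversed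
  have hdown : pvDownList n = ((PySem.List.pyRange (-d) 0 1).map f).reverse := by
    rw [pvDownList_eq, PySem.List.pyRange_one, List.map_map]
    have hlen : (0 - -d).toNat = (n / 12).toNat := by omega
    rw [hlen]
    apply List.ext_getElem
    · simp
    · intro i h1 h2
      simp only [List.getElem_reverse, List.getElem_map, List.getElem_range,
        Function.comp_apply, hf, List.length_map, List.length_range]
      simp only [List.length_map, List.length_range] at h1
      omega
  -- the up-loop elements are the k > 0 segment of B
  have hup : pvUpList n = (PySem.List.pyRange 1 (u + 1) 1).map f := by
    rw [pvUpList_eq, PySem.List.pyRange_one, List.map_map]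
    have hlen : (u + 1 - 1).toNat = ((127 - n) / 12).toNat := by omega
    rw [hlen]
    apply List.map_congr_left
    intro i _
    simp only [Function.comp_apply, hf]
    ring
  apply PySem.List.sorted_eq_of_perm_of_pairwise_lt
  · -- B is a permutation of A's pre-sort list
    rw [pvUpLoop_eq, pvDownLoop_eq, hsplit, List.map_append, List.map_cons, ← hup]
    have h0 : f 0 = n := by simp [hf]
    rw [h0]
    have hD : (PySem.List.pyRange (-d) 0 1).map f = (pvDownList n).reverse := by
      rw [hdown, List.reverse_reverse]
    rw [hD]
    refine ((List.reverse_perm _).append_right _).trans ?_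
    exact List.perm_middle.trans (List.Perm.of_eq (by simp))
  · -- B is strictly increasing
    exact List.Pairwise.map f (fun a b hab => by simp only [hf]; omega)
      (PySem.List.pairwise_lt_pyRange_one (-d) (u + 1))
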